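-- pv_equiv track=rewrite | github.com/manhitv/codesignal | Arcade/TheCore/SpringOfIntegration.py | arrayConversion
-- ===== SOURCE A (Python) =====
-- def arrayConversion(a):
--     s, i = a[:], 1
--     if len(s) == 1:
--         return s[0]
--     while True:
--         if i%2:
--             s = [s[i] + s[i+1] for i in range(0, len(s) - 1, 2)]
--         else:
--             s = [s[i]*s[i+1] for i in range(0, len(s) - 1, 2)]
--         if len(s) == 1:
--             break
--         i += 1
--     return s[0]
-- ===== SOURCE B (Python) =====
-- def arrayConversion(a):
--     def pair_up(s):
--         it = iter(s)
--         return list(zip(it, it))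
--
--     def go(s, add):
--         if len(s) == 1:
--             return s[0]
--         if add:
--             nxt = [x + y for x, y in pair_up(s)]
--         else:
--             nxt = [x * y for x, y in pair_up(s)]
--         return go(nxt, not add)
--
--     return go(list(a), True)
-- ===== Notes on version B (the rewrite author's own statement) =====
-- stated objective: alternative
-- what changed: Replaces the while-True loop with an int round counter and index-range comprehensions by a recursive helper carrying a Boolean sum/product flag, pairing neighbours with an iterator zip instead of s[i],s[i+1] indexing.
import Mathlib
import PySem

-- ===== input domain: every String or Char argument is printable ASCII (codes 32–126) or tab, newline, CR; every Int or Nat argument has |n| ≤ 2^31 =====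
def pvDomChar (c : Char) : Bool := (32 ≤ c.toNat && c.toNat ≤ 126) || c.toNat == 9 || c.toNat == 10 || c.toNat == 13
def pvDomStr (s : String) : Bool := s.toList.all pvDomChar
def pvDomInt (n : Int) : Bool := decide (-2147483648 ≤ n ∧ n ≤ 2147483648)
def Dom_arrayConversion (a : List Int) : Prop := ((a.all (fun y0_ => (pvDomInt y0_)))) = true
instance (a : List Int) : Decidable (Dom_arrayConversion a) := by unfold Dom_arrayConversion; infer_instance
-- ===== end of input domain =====

-- B replaces A's while-loop with an int round counter and index-range comprehensions by a
-- recursive helper with a Boolean sum/product flag that pairs neighbours via an iterator zip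
-- (objective: alternative decomposition, same cost).

-- ===== PORT A =====
-- one reduction round: sum pairs when i is odd, multiply when i is even
def pvAStep (s : List Int) (i : Int) : List Int :=
  if PySem.Int.mod i 2 ≠ 0 then
    (PySem.List.pyRange 0 ((s.length : Int) - 1) 2).map
      (fun j => PySem.List.pyGetD s j 0 + PySem.List.pyGetD s (j + 1) 0)
  else
    (PySem.List.pyRange 0 ((s.length : Int) - 1) 2).map
      (fun j => PySem.List.pyGetD s j 0 * PySem.List.pyGetD s (j + 1) 0)

-- the 'while True' loop; fuel only makes it total (a nonempty s strictly shrinks each round,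
-- so fuel = s.length never runs out; the empty list, on which Python loops forever, is outside Pre_)
def pvALoop : Nat → List Int → Int → Int
  | 0, _, _ => 0
  | fuel + 1, s, i =>
    let s' := pvAStep s i
    if s'.length = 1 then PySem.List.pyGetD s' 0 0
    else pvALoop fuel s' (i + 1)

def arrayConversion (a : List Int) : Int :=
  if a.length = 1 then PySem.List.pyGetD a 0 0
  else pvALoop a.length a 1

-- ===== PORT B =====
-- list(zip(it, it)) on it = iter(s): consecutive disjoint pairs, trailing element dropped
def pvPairUp : List Int → List (Int × Int)
  | x :: y :: t => (x, y) :: pvPairUp t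
  | _ => []

theorem pvPairUp_length (s : List Int) : (pvPairUp s).length = s.length / 2 := by
  induction s using pvPairUp.induct with
  | case1 x y t ih => simp [pvPairUp, ih]; omega
  | case2 s h =>
    cases s with
    | nil => simp [pvPairUp]
    | cons x t =>
      cases t with
      | nil => simp [pvPairUp]
      | cons y t2 => exact (h x y t2 rfl).elim

-- go(s, add): len==1 returns s[0]; else build the sum/product pair list and recurse with the flag flipped
-- ([] is a totality guard only: Python's go recurses forever there, outside Pre_)
def pvGo : List Int → Bool → Int
  | [], _ => 0
  | [x], _ => x
  | x :: y :: t, add =>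
    let nxt := if add then (pvPairUp (x :: y :: t)).map (fun p => p.1 + p.2)
               else (pvPairUp (x :: y :: t)).map (fun p => p.1 * p.2)
    pvGo nxt (!add)
termination_by s _ => s.length
decreasing_by
  have := pvPairUp_length (x :: y :: t)
  split <;> simp_all <;> omega

def arrayConversion_alt (a : List Int) : Int := pvGo a true

-- ===== PRECONDITION & SPEC =====
-- Pre_ excludes only the empty list, on which A's while-loop never terminates (no value is returned).
def Pre_arrayConversion (a : List Int) : Prop := a ≠ []
instance (a : List Int) : Decidable (Pre_arrayConversion a) := by unfold Pre_arrayConversion; infer_instance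
def pvWitness_arrayConversion : List Int := [1, 2, 3, 4, 5]

def Spec_arrayConversion (a : List Int) (out : Int) : Prop := out = arrayConversion_alt a
instance (a : List Int) (out : Int) : Decidable (Spec_arrayConversion a out) := by unfold Spec_arrayConversion; infer_instance

-- ===== CLAIM (what is proved, stated in full; the proofs are below) =====
def Claim_equal_arrayConversion : Prop := ∀ (a : List Int), Dom_arrayConversion a → Pre_arrayConversion a → Spec_arrayConversion a (arrayConversion a)

-- ===== LEMMAS AND PROOFS =====

theorem pvGetD_cons_succ (x : Int) (t : List Int) (j : Int) (h : 0 ≤ j) (d : Int) :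
    PySem.List.pyGetD (x :: t) (j + 1) d = PySem.List.pyGetD t j d := by
  simp only [PySem.List.pyGetD, PySem.List.pyGet?, PySem.List.pyIdx?]
  have h1 : (0 ≤ j + 1) := by omega
  simp only [if_pos h, if_pos h1]
  by_cases hj : j < (t.length : Int)
  · have h2 : j + 1 < ((t.length : Nat) + 1 : Int) := by omega
    have hb : j.toNat < t.length := by omega
    simp [hj, h2, show (j + 1).toNat = j.toNat + 1 by omega, List.getElem?_eq_getElem hb]
  · simp [hj, show ¬ (j + 1 < ((t.length : Nat) + 1 : Int)) by omega]

theorem pvGetD_cons_zero (x : Int) (t : List Int) (d : Int) :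
    PySem.List.pyGetD (x :: t) 0 d = x := by
  simp [PySem.List.pyGetD, PySem.List.pyGet?, PySem.List.pyIdx?]

-- range(0, c+1, 2) for 0 ≤ c peels off index 0 and shifts the rest by 2
theorem pvRange2_cons (c : Int) (h : 0 ≤ c) :
    PySem.List.pyRange 0 (c + 1) 2 = 0 :: (PySem.List.pyRange 0 (c - 1) 2).map (· + 2) := by
  rw [PySem.List.pyRange_of_pos 0 (c + 1) (by omega), PySem.List.pyRange_of_pos 0 (c - 1) (by omega)]
  by_cases h1 : (0 : Int) < c - 1
  · have e1 : ((c + 1 - 0 + 2 - 1) / 2).toNat = ((c - 1 - 0 + 2 - 1) / 2).toNat + 1 := by omega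
    rw [if_pos (show (0:Int) < c + 1 by omega), if_pos h1, e1, List.range_succ_eq_map]
    simp only [List.map_cons, List.map_map]
    refine List.cons_eq_cons.mpr ⟨by norm_num, ?_⟩
    apply List.map_congr_left; intro k _
    simp only [Function.comp_apply]
    push_cast; ring
  · have hc : c = 0 ∨ c = 1 := by omega
    rcases hc with rfl | rfl <;> decide

-- A's one-round comprehension equals op mapped over B's pair list
theorem pvStep_eq (op : Int → Int → Int) (s : List Int) :
    (PySem.List.pyRange 0 ((s.length : Int) - 1) 2).map
      (fun j => op (PySem.List.pyGetD s j 0) (PySem.List.pyGetD s (j + 1) 0))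
      = (pvPairUp s).map (fun p => op p.1 p.2) := by
  induction s using pvPairUp.induct with
  | case1 x y t ih =>
    have hl : (((x :: y :: t).length : Int)) - 1 = (t.length : Int) + 1 := by simp
    rw [hl, pvRange2_cons _ (by positivity)]
    simp only [List.map_cons, List.map_map, pvPairUp]
    refine List.cons_eq_cons.mpr ⟨?_, ?_⟩
    · simp only [pvGetD_cons_succ x (y :: t) 0 le_rfl, pvGetD_cons_zero]
    · rw [← ih]
      apply List.map_congr_left
      intro j hj
      have hj0 : 0 ≤ j := by
        rcases (PySem.List.mem_pyRange_iff_of_pos (by omega) j).mp hj with ⟨h0, _⟩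
        omega
      have e1 : PySem.List.pyGetD (x :: y :: t) (j + 2) 0 = PySem.List.pyGetD t j 0 := by
        rw [show j + 2 = (j + 1) + 1 by ring, pvGetD_cons_succ x _ (j + 1) (by omega),
          pvGetD_cons_succ y _ j hj0]
      have e2 : PySem.List.pyGetD (x :: y :: t) (j + 2 + 1) 0 = PySem.List.pyGetD t (j + 1) 0 := by
        rw [show j + 2 + 1 = (j + 1 + 1) + 1 by ring, pvGetD_cons_succ x _ (j + 1 + 1) (by omega),
          pvGetD_cons_succ y _ (j + 1) (by omega)]
      simp only [Function.comp_apply, e1, e2]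
  | case2 s h =>
    cases s with
    | nil =>
      simp only [pvPairUp, List.map_nil]
      rw [show ((([] : List Int).length : Int)) - 1 = -1 by simp,
        PySem.List.pyRange_of_pos 0 (-1) (by omega)]
      simp
    | cons x t =>
      cases t with
      | cons y t2 => exact (h x y t2 rfl).elim
      | nil =>
        simp only [pvPairUp, List.map_nil]
        rw [show (([x] : List Int).length : Int) - 1 = 0 by simp]
        rw [PySem.List.pyRange_of_pos 0 0 (by omega)]
        simp

-- the body of pvGo on a list of length ≥ 2 is exactly pvAStep with the matching parity
theorem pvStep_go (s : List Int) (i : Int) (add : Bool)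
    (hpar : PySem.Int.mod i 2 = (if add then 1 else 0)) :
    pvAStep s i = (if add then (pvPairUp s).map (fun p => p.1 + p.2)
                   else (pvPairUp s).map (fun p => p.1 * p.2)) := by
  unfold pvAStep
  cases add <;> simp only [hpar] <;> simp [pvStep_eq]

theorem pvLoop_eq (fuel : Nat) (s : List Int) (i : Int) (add : Bool)
    (hlen : 2 ≤ s.length) (hfuel : s.length ≤ fuel)
    (hpar : PySem.Int.mod i 2 = (if add then 1 else 0)) :
    pvALoop fuel s i = pvGo s add := by
  induction fuel generalizing s i add with
  | zero => omega
  | succ f ih =>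
    match s, hlen with
    | x :: y :: t, _ =>
      have hstep := pvStep_go (x :: y :: t) i add hpar
      have hgo : pvGo (x :: y :: t) add =
          pvGo (if add then (pvPairUp (x :: y :: t)).map (fun p => p.1 + p.2)
                else (pvPairUp (x :: y :: t)).map (fun p => p.1 * p.2)) (!add) := by
        rw [pvGo]
      set s' := pvAStep (x :: y :: t) i with hs'
      have hlen' : s'.length = (x :: y :: t).length / 2 := by
        rw [hstep]; cases add <;> simp [pvPairUp_length]
      have hx : (x :: y :: t).length = t.length + 2 := by simp
      rw [pvALoop]
      simp only [← hs'] at *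
      by_cases h1 : s'.length = 1
      · rw [if_pos h1, hgo, ← hstep]
        match s', h1 with
        | [z], _ => rw [pvGetD_cons_zero, pvGo]
      · rw [if_neg h1, hgo, ← hstep]
        apply ih
        · omega
        · omega
        · have h2 : PySem.Int.mod i 2 = i % 2 := PySem.Int.mod_eq_emod_of_pos (by omega)
          have h3 : PySem.Int.mod (i + 1) 2 = (i + 1) % 2 := PySem.Int.mod_eq_emod_of_pos (by omega)
          rw [h2] at hpar; rw [h3]
          cases add
          · simp only [Bool.not_false, if_true] at hpar ⊢
            simp only [if_neg (Bool.false_ne_true ∘ id)] at hpar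
            omega
          · simp only [Bool.not_true] at hpar ⊢
            simp at hpar ⊢
            omega

-- ===== VERDICT (by name: the statement is the Claim_ definition above) =====
theorem arrayConversion_spec : Claim_equal_arrayConversion := by
  intro a _ hpre
  unfold Spec_arrayConversion arrayConversion arrayConversion_alt
  by_cases h1 : a.length = 1
  · rw [if_pos h1]
    match a, h1 with
    | [x], _ => rw [pvGetD_cons_zero, pvGo]
  · rw [if_neg h1]
    have hlen : 2 ≤ a.length := by
      cases a with
      | nil => exact absurd rfl hpre
      | cons x t => simp only [List.length_cons] at h1 ⊢; omega
    exact pvLoop_eq a.length a 1 true hlen le_rfl (by decide)
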